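-- pv_equiv track=rewrite | github.com/GundalaNikhil/DSA | dsa-problems/NumberTheory/testcases/tc_generators/generate_num007.py | solve_query
-- ===== SOURCE A (Python) =====
-- def get_prime_factors(n):
--     factors = {}
--     d = 2
--     temp = n
--     while d * d <= temp:
--         if temp % d == 0:
--             count = 0
--             while temp % d == 0:
--                 count += 1
--                 temp //= d
--             factors[d] = count
--         d += 1
--     if temp > 1:
--         factors[temp] = factors.get(temp, 0) + 1
--     return factors
--
-- def solve_query(a, l, r, MOD):
--     max_factors = {}
--     for i in range(l, r + 1):
--         factors = get_prime_factors(a[i])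
--         for p, count in factors.items():
--             max_factors[p] = max(max_factors.get(p, 0), count)
--
--     res = 1
--     for p, count in max_factors.items():
--         for _ in range(count):
--             res = (res * p) % MOD
--     return res
-- ===== SOURCE B (Python) =====
-- def solve_query(a, l, r, MOD):
--     # Fold the true LCM with Euclid's gcd instead of per-element trial-division
--     # factorization; apply the modulus once at the end (A only ever applies the
--     # modulus when some prime factor was collected, i.e. when the LCM exceeds 1).
--     lcm = 1
--     for i in range(l, r + 1):
--         v = a[i]
--         if v < 2:
--             continue
--         g, x = lcm, v
--         while x:
--             g, x = x, g % x
--         lcm = lcm * v // g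
--     return lcm % MOD if lcm > 1 else 1
-- ===== Notes on version B (the rewrite author's own statement) =====
-- stated objective: alternative
-- what changed: Replaces per-element trial-division factorization into a global max-exponent dict followed by a modular product with a single fold that maintains the true LCM via Euclid's gcd and applies the modulus once at the end (returning 1 unmodded exactly when the LCM stayed 1, as A does when no prime factor was collected).
import Mathlib
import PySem

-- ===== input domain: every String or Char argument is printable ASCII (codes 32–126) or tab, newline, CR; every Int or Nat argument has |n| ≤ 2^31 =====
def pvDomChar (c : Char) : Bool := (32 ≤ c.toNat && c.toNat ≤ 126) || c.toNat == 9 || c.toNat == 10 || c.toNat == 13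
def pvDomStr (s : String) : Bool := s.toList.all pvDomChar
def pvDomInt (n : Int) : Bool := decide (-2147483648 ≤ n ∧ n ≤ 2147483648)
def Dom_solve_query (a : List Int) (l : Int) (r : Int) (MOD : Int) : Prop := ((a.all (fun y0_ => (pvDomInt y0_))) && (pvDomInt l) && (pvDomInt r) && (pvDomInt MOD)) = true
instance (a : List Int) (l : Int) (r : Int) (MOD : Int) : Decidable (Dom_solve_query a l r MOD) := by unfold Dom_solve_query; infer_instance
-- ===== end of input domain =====

-- B replaces A's per-element trial-division factorization + global max-exponent dict
-- by a single gcd-based LCM fold with one modulus at the end (objective: alternative).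

-- ===== PORT A =====
-- inner `while temp % d == 0` loop of get_prime_factors (fuel is only a totality bound)
def gpfInner : Nat → Int → Int → Int → Int × Int
  | 0, temp, _, count => (count, temp)
  | fuel+1, temp, d, count =>
    if PySem.Int.mod temp d = 0 then
      gpfInner fuel (PySem.Int.floordiv temp d) d (count + 1)
    else (count, temp)

-- outer `while d * d <= temp` loop of get_prime_factors
def gpfOuter : Nat → Int → Int → PySem.Dict Int Int → PySem.Dict Int Int × Int
  | 0, _, temp, factors => (factors, temp)
  | fuel+1, d, temp, factors =>
    if d * d ≤ temp then
      if PySem.Int.mod temp d = 0 then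
        let ct := gpfInner temp.natAbs temp d 0
        gpfOuter fuel (d + 1) ct.2 (factors.insert d ct.1)
      else gpfOuter fuel (d + 1) temp factors
    else (factors, temp)

def get_prime_factors (n : Int) : PySem.Dict Int Int :=
  let ft := gpfOuter (n.natAbs + 2) 2 n PySem.Dict.empty
  if ft.2 > 1 then ft.1.insert ft.2 (ft.1.getD ft.2 0 + 1) else ft.1

def solve_query (a : List Int) (l : Int) (r : Int) (MOD : Int) : Int :=
  let mf := (PySem.List.pyRange l (r + 1) 1).foldl
    (fun mf i =>
      (get_prime_factors (PySem.List.pyGetD a i 0)).items.foldl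
        (fun mf pc => mf.insert pc.1 (max (mf.getD pc.1 0) pc.2)) mf)
    PySem.Dict.empty
  mf.items.foldl
    (fun res pc =>
      (PySem.List.pyRange 0 pc.2 1).foldl (fun res _ => PySem.Int.mod (res * pc.1) MOD) res)
    1

-- ===== PORT B =====
-- `g, x = lcm, v; while x: g, x = x, g % x` (fuel is only a totality bound)
def pyGcdLoop : Nat → Int → Int → Int
  | 0, g, _ => g
  | fuel+1, g, x => if x = 0 then g else pyGcdLoop fuel x (PySem.Int.mod g x)

def solve_query_alt (a : List Int) (l : Int) (r : Int) (MOD : Int) : Int :=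
  let L := (PySem.List.pyRange l (r + 1) 1).foldl
    (fun L i =>
      let v := PySem.List.pyGetD a i 0
      if v < 2 then L
      else PySem.Int.floordiv (L * v) (pyGcdLoop (v.natAbs + 1) L v))
    1
  if L > 1 then PySem.Int.mod L MOD else 1

-- ===== PRECONDITION & SPEC =====
-- Pre_ excludes exactly the inputs where the Python A raises: an index of the queried
-- range outside the list (IndexError), and MOD = 0 when some value in the range is ≥ 2,
-- i.e. contributes a prime factor (ZeroDivisionError in the final `% MOD` loop).
def Pre_solve_query (a : List Int) (l : Int) (r : Int) (MOD : Int) : Prop :=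
  (r + 1 ≤ l ∨ (-(a.length : Int) ≤ l ∧ r < (a.length : Int))) ∧
  (MOD ≠ 0 ∨ ∀ i ∈ PySem.List.pyRange l (r + 1) 1, PySem.List.pyGetD a i 0 < 2)
instance (a : List Int) (l : Int) (r : Int) (MOD : Int) : Decidable (Pre_solve_query a l r MOD) := by
  unfold Pre_solve_query; infer_instance

def pvWitness_solve_query : List Int × Int × Int × Int := ([6, 4, -3], 0, 2, 7)

def Spec_solve_query (a : List Int) (l : Int) (r : Int) (MOD : Int) (out : Int) : Prop := out = solve_query_alt a l r MOD
instance (a : List Int) (l : Int) (r : Int) (MOD : Int) (out : Int) : Decidable (Spec_solve_query a l r MOD out) := by unfold Spec_solve_query; infer_instance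

-- ===== CLAIM (what is proved, stated in full; the proofs are below) =====
def Claim_equal_solve_query : Prop := ∀ (a : List Int) (l : Int) (r : Int) (MOD : Int), Dom_solve_query a l r MOD → Pre_solve_query a l r MOD → Spec_solve_query a l r MOD (solve_query a l r MOD)

-- ===== LEMMAS AND PROOFS =====

-- `Good D N`: D is the exact prime-exponent table of N (keys ≥ 2, positive exponents,
-- and looking up any natural q gives exactly the multiplicity of q in N)
def Good (D : PySem.Dict Int Int) (N : Nat) : Prop :=
  0 < N ∧ D.keys.Nodup ∧
  (∀ pc ∈ D.items, 2 ≤ pc.1 ∧ 1 ≤ pc.2) ∧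
  (∀ q : Nat, D.getD (q : Int) 0 = (N.factorization q : Int))

-- the product  ∏ p ^ e  over the items of a dict
def pvDprod (ps : List (Int × Int)) : Int := (ps.map (fun pc => pc.1 ^ pc.2.toNat)).prod

-- ---------- B-side ----------

theorem pyGcdLoop_eq (fuel : Nat) : ∀ (g x : Int), 0 ≤ g → 0 ≤ x → x.natAbs < fuel →
    pyGcdLoop fuel g x = (Nat.gcd x.toNat g.toNat : Int) := by
  induction fuel with
  | zero => intro g x _ _ h; omega
  | succ fuel ih =>
    intro g x hg hx hlt
    by_cases hx0 : x = 0
    · simp [pyGcdLoop, hx0, Int.toNat_of_nonneg hg]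
    · have hxpos : 0 < x := lt_of_le_of_ne hx (Ne.symm hx0)
      have hmod : PySem.Int.mod g x = ((g.toNat % x.toNat : Nat) : Int) := by
        rw [PySem.Int.mod_eq_emod_of_pos hxpos]
        conv_lhs => rw [← Int.toNat_of_nonneg hg, ← Int.toNat_of_nonneg hx]
        exact_mod_cast rfl
      have hmlt : g.toNat % x.toNat < x.toNat := Nat.mod_lt _ (by omega)
      have hrec := ih x (PySem.Int.mod g x) hx
        (by rw [hmod]; positivity) (by rw [hmod]; simp only [Int.natAbs_natCast]; omega)
      rw [pyGcdLoop, if_neg hx0, hrec, hmod]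
      simp only [Int.toNat_natCast]
      rw [Nat.gcd_rec x.toNat g.toNat, Nat.gcd_comm]

theorem pvNfold_pos (vs : List Int) : ∀ N : Nat, 0 < N →
    0 < vs.foldl (fun n v => if v < 2 then n else Nat.lcm n v.toNat) N := by
  induction vs with
  | nil => intro N h; simpa using h
  | cons v vs ih =>
    intro N hN
    simp only [List.foldl_cons]
    by_cases hv : v < 2
    · rw [if_pos hv]; exact ih N hN
    · rw [if_neg hv]; exact ih _ (Nat.lcm_pos hN (by omega))

theorem pvBfold_eq (vs : List Int) : ∀ N : Nat, 0 < N →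
    vs.foldl (fun L i =>
        if i < 2 then L
        else PySem.Int.floordiv (L * i) (pyGcdLoop (i.natAbs + 1) L i)) (N : Int)
    = ((vs.foldl (fun n v => if v < 2 then n else Nat.lcm n v.toNat) N : Nat) : Int) := by
  induction vs with
  | nil => intro N _; simp
  | cons v vs ih =>
    intro N hN
    simp only [List.foldl_cons]
    by_cases hv : v < 2
    · rw [if_pos hv, if_pos hv]; exact ih N hN
    · rw [if_neg hv, if_neg hv]
      have hv2 : (2 : Int) ≤ v := by omega
      have hgcd : pyGcdLoop (v.natAbs + 1) (N : Int) v = (Nat.gcd v.toNat N : Int) := by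
        rw [pyGcdLoop_eq (v.natAbs + 1) (N : Int) v (by positivity) (by omega) (by omega)]
        simp
      have hstep : PySem.Int.floordiv ((N : Int) * v) (pyGcdLoop (v.natAbs + 1) (N : Int) v)
          = ((Nat.lcm N v.toNat : Nat) : Int) := by
        rw [hgcd]
        have hvcast : (v.toNat : Int) = v := Int.toNat_of_nonneg (by omega)
        have : ((N : Int) * v) = ((N * v.toNat : Nat) : Int) := by
          push_cast [hvcast]; ring
        rw [this, PySem.Int.floordiv_natCast]
        have : Nat.lcm N v.toNat = N * v.toNat / Nat.gcd v.toNat N := by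
          rw [Nat.gcd_comm]; rfl
        rw [this]
      rw [hstep]
      exact ih _ (Nat.lcm_pos hN (by omega))

-- ---------- A-side: the final `% MOD` product loop ----------

theorem pvFmodMul (a b M : Int) :
    PySem.Int.mod (PySem.Int.mod a M * b) M = PySem.Int.mod (a * b) M := by
  show (Int.fmod a M * b).fmod M = (a * b).fmod M
  conv_rhs => rw [Int.mul_fmod]
  rw [Int.mul_fmod, Int.fmod_fmod_of_dvd _ dvd_rfl]

theorem pvFoldConst {α : Type} (f : Int → Int) (xs : List α) : ∀ r : Int,
    xs.foldl (fun r _ => f r) r = f^[xs.length] r := by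
  induction xs with
  | nil => intro r; simp
  | cons x xs ih => intro r; simp [ih, Function.iterate_succ_apply]

theorem pvIter (p M : Int) : ∀ m : Nat, 1 ≤ m → ∀ r : Int,
    (fun r => PySem.Int.mod (r * p) M)^[m] r = PySem.Int.mod (r * p ^ m) M := by
  intro m hm
  induction m with
  | zero => omega
  | succ m ih =>
    intro r
    by_cases hm0 : m = 0
    · subst hm0; simp
    · rw [Function.iterate_succ_apply, ih (by omega)]
      rw [pvFmodMul]
      ring_nf

theorem pvInnerLoop (p e M r : Int) (he : 1 ≤ e) :
    (PySem.List.pyRange 0 e 1).foldl (fun r _ => PySem.Int.mod (r * p) M) r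
    = PySem.Int.mod (r * p ^ e.toNat) M := by
  rw [pvFoldConst (fun r => PySem.Int.mod (r * p) M)]
  rw [PySem.List.length_pyRange_one]
  rw [pvIter p M _ (by omega)]
  norm_num

theorem pvOuterLoop (M : Int) : ∀ (ps : List (Int × Int)) (r : Int), (∀ pc ∈ ps, 1 ≤ pc.2) →
    ps.foldl (fun res pc =>
        (PySem.List.pyRange 0 pc.2 1).foldl (fun res _ => PySem.Int.mod (res * pc.1) M) res) r
    = if ps = [] then r else PySem.Int.mod (r * pvDprod ps) M := by
  intro ps
  induction ps with
  | nil => intro r _; simp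
  | cons pc ps ih =>
    intro r hpos
    simp only [List.foldl_cons]
    rw [pvInnerLoop pc.1 pc.2 M r (hpos pc (by simp))]
    rw [ih _ (fun x hx => hpos x (by simp [hx]))]
    by_cases hps : ps = []
    · subst hps; simp [pvDprod]
    · rw [if_neg hps, if_neg (by simp)]
      rw [pvFmodMul,
        show pvDprod (pc :: ps) = pc.1 ^ pc.2.toNat * pvDprod ps from by
          simp [pvDprod]]
      ring_nf

-- ---------- `Good` consequences ----------

theorem pvGood_entry {D : PySem.Dict Int Int} {N : Nat} (h : Good D N) :
    ∀ pc ∈ D.items, pc.2 = (N.factorization pc.1.toNat : Int) ∧ ((pc.1.toNat : Int) = pc.1) := by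
  obtain ⟨_, hnd, hitems, hgetD⟩ := h
  intro pc hpc
  have h2 := (hitems pc hpc).1
  have hcast : ((pc.1.toNat : Int)) = pc.1 := Int.toNat_of_nonneg (by omega)
  constructor
  · have hval := PySem.Dict.getD_of_mem_items D hpc hnd 0
    have := hgetD pc.1.toNat
    rw [hcast] at this
    rw [← hval, this]
  · exact hcast

theorem pvGood_prod {D : PySem.Dict Int Int} {N : Nat} (h : Good D N) :
    pvDprod D.items = (N : Int) := by
  obtain ⟨hN, hnd, hitems, hgetD⟩ := h
  have hentry := pvGood_entry ⟨hN, hnd, hitems, hgetD⟩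
  set keysNat := D.items.map (fun pc => pc.1.toNat) with hkeysNat
  have hndN : keysNat.Nodup := by
    have h0 : keysNat = D.keys.map Int.toNat := by
      simp [hkeysNat, PySem.Dict.keys, List.map_map]
    rw [h0]
    refine List.Nodup.map_on ?_ hnd
    intro x hx y hy hxy
    have hx2 : 2 ≤ x := by
      simp only [PySem.Dict.keys, List.mem_map] at hx
      obtain ⟨pc, hpc, rfl⟩ := hx
      exact (hitems pc hpc).1
    have hy2 : 2 ≤ y := by
      simp only [PySem.Dict.keys, List.mem_map] at hy
      obtain ⟨pc, hpc, rfl⟩ := hy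
      exact (hitems pc hpc).1
    omega
  have hsupp : keysNat.toFinset = N.factorization.support := by
    ext q
    simp only [List.mem_toFinset, Finsupp.mem_support_iff]
    constructor
    · intro hq
      simp only [hkeysNat, List.mem_map] at hq
      obtain ⟨pc, hpc, rfl⟩ := hq
      have := (hentry pc hpc).1
      have h1 := (hitems pc hpc).2
      omega
    · intro hq
      have hc : D.contains (q : Int) = true := by
        by_contra hcf
        have : D.getD (q : Int) 0 = 0 :=
          PySem.Dict.getD_of_not_contains D 0 (by simpa using hcf)
        rw [hgetD q] at this
        omega
      have hk : (q : Int) ∈ D.keys := (PySem.Dict.contains_iff_mem_keys D _).mp hc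
      simp only [PySem.Dict.keys, List.mem_map] at hk
      obtain ⟨pc, hpc, hpc1⟩ := hk
      simp only [hkeysNat, List.mem_map]
      exact ⟨pc, hpc, by rw [hpc1]; simp⟩
  have h1 : (N.factorization.prod fun p k => p ^ k) = N :=
    Nat.prod_factorization_pow_eq_self (by omega)
  rw [Finsupp.prod, ← hsupp, List.prod_toFinset _ hndN, hkeysNat, List.map_map] at h1
  have h2 : (D.items.map ((fun q => q ^ N.factorization q) ∘ fun pc => pc.1.toNat)).prod
      = (D.items.map (fun pc => pc.1.toNat ^ pc.2.toNat)).prod := by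
    congr 1
    apply List.map_congr_left
    intro pc hpc
    have := (hentry pc hpc).1
    simp only [Function.comp_apply]
    congr 1
    omega
  rw [h2] at h1
  rw [pvDprod, ← h1]
  rw [Nat.cast_list_prod, List.map_map]
  congr 1
  apply List.map_congr_left
  intro pc hpc
  simp only [Function.comp_apply]
  push_cast
  rw [(hentry pc hpc).2]

theorem pvGood_empty_iff {D : PySem.Dict Int Int} {N : Nat} (h : Good D N) :
    D.items = [] ↔ N = 1 := by
  constructor
  · intro he
    have := pvGood_prod h
    rw [he] at this
    simp [pvDprod] at this
    omega
  · intro h1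
    subst h1
    by_contra hne
    obtain ⟨pc, hpc⟩ := List.exists_mem_of_ne_nil _ hne
    have := (pvGood_entry h pc hpc).1
    have h1 := (h.2.2.1 pc hpc).2
    simp [Nat.factorization_one] at this
    omega

-- ---------- merging a factor dict by pointwise max ----------

theorem pvMergeGetD : ∀ (ps : List (Int × Int)) (D : PySem.Dict Int Int) (k : Int),
    (ps.map Prod.fst).Nodup →
    (ps.foldl (fun d pc => d.insert pc.1 (max (d.getD pc.1 0) pc.2)) D).getD k 0
    = match ps.find? (fun pc => pc.1 == k) with
      | some pc => max (D.getD k 0) pc.2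
      | none => D.getD k 0 := by
  intro ps
  induction ps with
  | nil => intro D k _; simp
  | cons pc ps ih =>
    intro D k hnd
    simp only [List.map_cons, List.nodup_cons] at hnd
    simp only [List.foldl_cons]
    rw [ih _ k hnd.2]
    by_cases hk : pc.1 = k
    · subst hk
      have hfind : ps.find? (fun x => x.1 == pc.1) = none := by
        rw [List.find?_eq_none]
        intro x hx hbeq
        exact absurd (List.mem_map.mpr ⟨x, hx, by simpa using hbeq⟩) hnd.1
      rw [hfind, List.find?_cons_of_pos (by simp)]
      simp
    · rw [List.find?_cons_of_neg (by simpa using hk)]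
      cases hf : ps.find? (fun x => x.1 == k) with
      | none => simp [PySem.Dict.getD_insert, Ne.symm hk]
      | some x => simp [PySem.Dict.getD_insert, Ne.symm hk]

theorem pvMergeItems : ∀ (ps : List (Int × Int)) (D : PySem.Dict Int Int),
    (∀ pc ∈ ps, 2 ≤ pc.1 ∧ 1 ≤ pc.2) → (∀ pc ∈ D.items, 2 ≤ pc.1 ∧ 1 ≤ pc.2) →
    ∀ pc ∈ (ps.foldl (fun d x => d.insert x.1 (max (d.getD x.1 0) x.2)) D).items,
      2 ≤ pc.1 ∧ 1 ≤ pc.2 := by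
  intro ps
  induction ps with
  | nil => intro D _ hD; simpa using hD
  | cons x ps ih =>
    intro D hps hD
    simp only [List.foldl_cons]
    apply ih _ (fun pc hpc => hps pc (by simp [hpc]))
    intro pc hpc
    rw [PySem.Dict.mem_items_insert] at hpc
    rcases hpc with rfl | ⟨hpc, _⟩
    · exact ⟨(hps x (by simp)).1, le_trans (hps x (by simp)).2 (le_max_right _ _)⟩
    · exact hD pc hpc

theorem pvMerge {D F : PySem.Dict Int Int} {N M : Nat} (hD : Good D N) (hF : Good F M) :
    Good (F.items.foldl (fun d pc => d.insert pc.1 (max (d.getD pc.1 0) pc.2)) D)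
      (Nat.lcm N M) := by
  obtain ⟨hN, hndD, hitD, hgD⟩ := hD
  obtain ⟨hM, hndF, hitF, hgF⟩ := hF
  have hndFk : (F.items.map Prod.fst).Nodup := hndF
  refine ⟨Nat.lcm_pos hN hM,
    PySem.Dict.nodup_keys_foldl_insert_key F.items Prod.fst _ D hndD,
    pvMergeItems F.items D hitF hitD, ?_⟩
  intro q
  rw [pvMergeGetD F.items D (q : Int) hndFk]
  have hlcm : (Nat.lcm N M).factorization q = max (N.factorization q) (M.factorization q) := by
    rw [Nat.factorization_lcm (by omega) (by omega), Finsupp.sup_apply]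
  cases hf : F.items.find? (fun pc => pc.1 == (q : Int)) with
  | none =>
    have hFq : M.factorization q = 0 := by
      by_contra h0
      have hc : F.contains (q : Int) = true := by
        by_contra hcf
        have := PySem.Dict.getD_of_not_contains F 0 (by simpa using hcf)
        rw [hgF q] at this; omega
      have hk := (PySem.Dict.contains_iff_mem_keys F _).mp hc
      simp only [PySem.Dict.keys, List.mem_map] at hk
      obtain ⟨pc, hpc, hpc1⟩ := hk
      have := List.find?_eq_none.mp hf pc hpc
      simp [hpc1] at this
    show D.getD (q : Int) 0 = ((Nat.lcm N M).factorization q : Int)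
    rw [hgD q, hlcm, hFq]
    simp
  | some pc =>
    have hmem := List.mem_of_find?_eq_some hf
    have hbeq : pc.1 = (q : Int) := by simpa using List.find?_some hf
    have hval : pc.2 = (M.factorization q : Int) := by
      have h0 := (pvGood_entry ⟨hM, hndF, hitF, hgF⟩ pc hmem).1
      rw [h0]
      congr 1
      rw [hbeq]; simp
    show max (D.getD (q : Int) 0) pc.2 = ((Nat.lcm N M).factorization q : Int)
    rw [hgD q, hval, hlcm]
    simp [Nat.cast_max]

-- ---------- trial-division correctness ----------

theorem gpfInner_spec : ∀ (fuel t p : Nat) (count : Int), 2 ≤ p → 1 ≤ t → t ≤ fuel →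
    ∃ k t' : Nat, gpfInner fuel (t : Int) (p : Int) count = (count + (k : Int), (t' : Int))
      ∧ 1 ≤ t' ∧ ¬ p ∣ t' ∧ t = t' * p ^ k := by
  intro fuel
  induction fuel with
  | zero => intro t p count _ h1 h2; omega
  | succ fuel ih =>
    intro t p count hp h1 h2
    by_cases hdvd : p ∣ t
    · have hmod : PySem.Int.mod (t : Int) (p : Int) = 0 := by
        rw [PySem.Int.mod_eq_zero_iff_dvd]
        exact_mod_cast hdvd
      have hfd : PySem.Int.floordiv (t : Int) (p : Int) = ((t / p : Nat) : Int) :=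
        PySem.Int.floordiv_natCast t p
      have htp1 : 1 ≤ t / p := (Nat.one_le_div_iff (by omega)).mpr (Nat.le_of_dvd (by omega) hdvd)
      have htple : t / p ≤ fuel := by
        have : t / p < t := Nat.div_lt_self (by omega) (by omega)
        omega
      obtain ⟨k, t', heq, ht'1, hnd, hrep⟩ := ih (t / p) p (count + 1) hp htp1 htple
      refine ⟨k + 1, t', ?_, ht'1, hnd, ?_⟩
      · rw [gpfInner, if_pos hmod, hfd, heq]
        simp only [Prod.mk.injEq]
        exact ⟨by push_cast; ring, trivial⟩
      · have h0 : t = p * (t / p) := (Nat.mul_div_cancel' hdvd).symm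
        rw [h0, hrep]; ring
    · have hmod : ¬ PySem.Int.mod (t : Int) (p : Int) = 0 := by
        rw [PySem.Int.mod_eq_zero_iff_dvd]
        intro h0
        exact hdvd (by exact_mod_cast h0)
      refine ⟨0, t, ?_, h1, hdvd, by simp⟩
      rw [gpfInner, if_neg hmod]
      simp

-- getD is 0 at or above a bound dominating every key
theorem pvGetD_big {F : PySem.Dict Int Int} {d x : Int}
    (hit : ∀ pc ∈ F.items, pc.1 < d) (hx : d ≤ x) : F.getD x 0 = 0 := by
  apply PySem.Dict.getD_of_not_contains
  by_contra h
  have hc : F.contains x = true := by revert h; cases F.contains x <;> simp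
  have hk := (PySem.Dict.contains_iff_mem_keys F x).mp hc
  simp only [PySem.Dict.keys, List.mem_map] at hk
  obtain ⟨pc, hpc, hpc1⟩ := hk
  have := hit pc hpc
  omega

-- loop invariant of get_prime_factors' outer loop on input n:
-- temp ≥ 1 with no prime factor < d, and `factors` holds the exact multiplicities
-- of all primes < d in n (keys ≥ 2 and < d, positive exponents)
def OInv (n : Nat) (d temp : Int) (F : PySem.Dict Int Int) : Prop :=
  1 ≤ temp ∧ 2 ≤ d ∧ F.keys.Nodup ∧
  (∀ pc ∈ F.items, 2 ≤ pc.1 ∧ pc.1 < d ∧ 1 ≤ pc.2) ∧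
  (∀ q : Nat, F.getD (q : Int) 0 + (temp.toNat.factorization q : Int) = (n.factorization q : Int)) ∧
  (∀ q : Nat, (q : Int) < d → temp.toNat.factorization q = 0)

theorem pvExit {n : Nat} {d temp : Int} {F : PySem.Dict Int Int} (hn : 0 < n)
    (hinv : OInv n d temp F) (hlt : temp < d * d) :
    Good (if temp > 1 then F.insert temp (F.getD temp 0 + 1) else F) n := by
  obtain ⟨h1, hd, hnd, hit, ha, hb⟩ := hinv
  by_cases ht1 : temp > 1
  case neg =>
    have htemp1 : temp = 1 := by omega
    subst htemp1
    rw [if_neg ht1]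
    refine ⟨hn, hnd, fun pc hpc => ⟨(hit pc hpc).1, (hit pc hpc).2.2⟩, ?_⟩
    intro q
    have := ha q
    simpa [Nat.factorization_one] using this
  case pos =>
    set t := temp.toNat with hts
    have htemp : (t : Int) = temp := Int.toNat_of_nonneg (by omega)
    have ht2 : 2 ≤ t := by omega
    have hP : t.Prime := by
      by_contra hnp
      have hmf := Nat.minFac_prime (n := t) (by omega)
      have hdvd := Nat.minFac_dvd t
      have hpos : 0 < t.factorization t.minFac :=
        hmf.factorization_pos_of_dvd (by omega) hdvd
      have hge : d ≤ (t.minFac : Int) := by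
        by_contra hlt2
        have := hb t.minFac (by omega)
        omega
      have hsq := Nat.minFac_sq_le_self (n := t) (by omega) hnp
      have hsq' : (t.minFac : Int) * t.minFac ≤ (t : Int) := by
        rw [pow_two] at hsq
        exact_mod_cast hsq
      nlinarith
  -- with temp prime and ≥ d²-free below d, temp itself is ≥ d, hence a fresh key
    have hge : d ≤ temp := by
      by_contra hlt2
      have h0 := hb t (by omega)
      have hpos := hP.factorization_pos_of_dvd (by omega) dvd_rfl
      omega
    have hnotkey : F.getD temp 0 = 0 := pvGetD_big (fun pc hpc => (hit pc hpc).2.1) hge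
    rw [if_pos ht1, hnotkey]
    refine ⟨hn, PySem.Dict.nodup_keys_insert F temp _ hnd, ?_, ?_⟩
    · intro pc hpc
      rw [PySem.Dict.mem_items_insert] at hpc
      rcases hpc with rfl | ⟨hpc, _⟩
      · exact ⟨by omega, by omega⟩
      · exact ⟨(hit pc hpc).1, (hit pc hpc).2.2⟩
    · intro q
      rw [PySem.Dict.getD_insert]
      by_cases hq : (q : Int) = temp
      · rw [if_pos hq]
        have hqt : q = t := by omega
        have h2 := ha q
        rw [hq, hnotkey] at h2
        have hself : t.factorization t = 1 := by
          rw [hP.factorization]; exact Finsupp.single_eq_same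
        rw [hqt] at h2 ⊢
        rw [hself] at h2
        omega
      · rw [if_neg hq]
        have h2 := ha q
        have hfq : t.factorization q = 0 := by
          rw [hP.factorization]
          exact Finsupp.single_eq_of_ne (by omega)
        rw [hfq] at h2
        simpa using h2

theorem pvOuterGood (n : Nat) (hn : 0 < n) : ∀ (fuel : Nat) (d temp : Int) (F : PySem.Dict Int Int),
    OInv n d temp F → temp < d + fuel →
    Good (if (gpfOuter fuel d temp F).2 > 1
          then (gpfOuter fuel d temp F).1.insert (gpfOuter fuel d temp F).2
                 ((gpfOuter fuel d temp F).1.getD (gpfOuter fuel d temp F).2 0 + 1)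
          else (gpfOuter fuel d temp F).1) n := by
  intro fuel
  induction fuel with
  | zero =>
    intro d temp F hinv hlt
    have hd := hinv.2.1
    simp only [gpfOuter]
    refine pvExit hn hinv ?_
    have htd : temp < d := by omega
    nlinarith [sq_nonneg (d - 1)]
  | succ fuel ih =>
    intro d temp F hinv hlt
    obtain ⟨h1, hd, hnd, hit, ha, hb⟩ := hinv
    by_cases hloop : d * d ≤ temp
    · by_cases hmod : PySem.Int.mod temp d = 0
      · -- d divides temp: d is prime; divide it out completely
        have hdvdI : d ∣ temp := (PySem.Int.mod_eq_zero_iff_dvd temp d).mp hmod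
        set t := temp.toNat with hts
        have htemp : (t : Int) = temp := Int.toNat_of_nonneg (by omega)
        set dN := d.toNat with hds
        have hdcast : (dN : Int) = d := Int.toNat_of_nonneg (by omega)
        have hdN2 : 2 ≤ dN := by omega
        have hdvdN : dN ∣ t := by
          have h0 := hdvdI
          rw [← htemp, ← hdcast] at h0
          exact_mod_cast h0
        have hPd : dN.Prime := by
          have hmfp := Nat.minFac_prime (n := dN) (by omega)
          have hmfdvd : dN.minFac ∣ t := (Nat.minFac_dvd dN).trans hdvdN
          have hpos := hmfp.factorization_pos_of_dvd (n := t) (by omega) hmfdvd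
          have hge : d ≤ (dN.minFac : Int) := by
            by_contra hl
            have := hb dN.minFac (by omega)
            omega
          have hle : dN.minFac ≤ dN := Nat.minFac_le (by omega)
          have hEq : dN.minFac = dN := by omega
          rw [← hEq]; exact hmfp
        obtain ⟨k, t', heq, ht'1, hnotdvd, hrep⟩ :=
          gpfInner_spec temp.natAbs t dN 0 hdN2 (by omega) (by omega)
        rw [htemp, hdcast] at heq
        have hk1 : 1 ≤ k := by
          rcases Nat.eq_zero_or_pos k with hk0 | hk
          · exfalso; rw [hk0, pow_zero, mul_one] at hrep; exact hnotdvd (hrep ▸ hdvdN)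
          · exact hk
        have hfact : ∀ q : Nat, t.factorization q = t'.factorization q + (Finsupp.single dN k) q := by
          intro q
          rw [hrep, Nat.factorization_mul (by omega) (pow_ne_zero _ (by omega)),
            hPd.factorization_pow]
          simp
        have ht'le : t' ≤ t := Nat.le_of_dvd (by omega) ⟨dN ^ k, hrep⟩
        have hstep : gpfOuter (fuel+1) d temp F
            = gpfOuter fuel (d+1) ((t' : Nat) : Int) (F.insert d (k : Int)) := by
          rw [gpfOuter]
          rw [if_pos hloop, if_pos hmod, heq]
          simp
        rw [hstep]
        apply ih
        · refine ⟨by omega, by omega, PySem.Dict.nodup_keys_insert F d _ hnd, ?_, ?_, ?_⟩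
          · intro pc hpc
            rw [PySem.Dict.mem_items_insert] at hpc
            rcases hpc with rfl | ⟨hpc, _⟩
            · exact ⟨hd, by omega, by omega⟩
            · exact ⟨(hit pc hpc).1, by have := (hit pc hpc).2.1; omega, (hit pc hpc).2.2⟩
          · intro q
            rw [PySem.Dict.getD_insert]
            by_cases hq : (q : Int) = d
            · rw [if_pos hq]
              have hqd : q = dN := by omega
              have h2 := ha q
              have h0 : F.getD (q : Int) 0 = 0 :=
                pvGetD_big (fun pc hpc => (hit pc hpc).2.1) (by omega)
              have h3 := hfact q
              rw [hqd, Finsupp.single_eq_same] at h3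
              have h4 : t'.factorization dN = 0 := Nat.factorization_eq_zero_of_not_dvd hnotdvd
              rw [Int.toNat_natCast]
              rw [hqd] at h2 h0 ⊢
              omega
            · rw [if_neg hq]
              have h2 := ha q
              have h3 := hfact q
              rw [Finsupp.single_eq_of_ne (by omega)] at h3
              rw [Int.toNat_natCast]
              omega
          · intro q hq
            rw [Int.toNat_natCast]
            by_cases hq2 : (q : Int) < d
            · have h0 := hb q hq2
              have h3 := hfact q
              rw [Finsupp.single_eq_of_ne (by omega)] at h3
              omega
            · have hqd : q = dN := by omega
              subst hqd
              exact Nat.factorization_eq_zero_of_not_dvd hnotdvd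
        · omega
      · -- d does not divide temp
        have hndvd : ¬ d ∣ temp := fun h0 => hmod ((PySem.Int.mod_eq_zero_iff_dvd temp d).mpr h0)
        have hstep : gpfOuter (fuel+1) d temp F = gpfOuter fuel (d+1) temp F := by
          rw [gpfOuter, if_pos hloop, if_neg hmod]
        rw [hstep]
        apply ih
        · refine ⟨h1, by omega, hnd, ?_, ha, ?_⟩
          · intro pc hpc
            exact ⟨(hit pc hpc).1, by have := (hit pc hpc).2.1; omega, (hit pc hpc).2.2⟩
          · intro q hq
            by_cases hq2 : (q : Int) < d
            · exact hb q hq2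
            · have hqd : (q : Int) = d := by omega
              apply Nat.factorization_eq_zero_of_not_dvd
              intro hdd
              apply hndvd
              have htemp : (temp.toNat : Int) = temp := Int.toNat_of_nonneg (by omega)
              rw [← htemp, ← hqd]
              exact_mod_cast hdd
        · omega
    · have hstep : gpfOuter (fuel+1) d temp F = (F, temp) := by
        rw [gpfOuter, if_neg hloop]
      rw [hstep]
      exact pvExit hn ⟨h1, hd, hnd, hit, ha, hb⟩ (by omega)

theorem pvGood_empty : Good PySem.Dict.empty 1 := by
  refine ⟨one_pos, ?_, ?_, ?_⟩
  · have : (PySem.Dict.empty : PySem.Dict Int Int).keys = [] := rfl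
    simp [this]
  · intro pc hpc
    have : (PySem.Dict.empty : PySem.Dict Int Int).items = [] := rfl
    rw [this] at hpc
    simp at hpc
  · intro q
    rw [PySem.Dict.getD_empty]
    simp [Nat.factorization_one]

theorem gpf_small (v : Int) (hv : v < 2) : get_prime_factors v = PySem.Dict.empty := by
  have hstep : gpfOuter (v.natAbs + 2) 2 v PySem.Dict.empty = (PySem.Dict.empty, v) := by
    rw [show v.natAbs + 2 = (v.natAbs + 1) + 1 from rfl]
    rw [gpfOuter, if_neg (by omega)]
  simp only [get_prime_factors, hstep]
  rw [if_neg (by omega)]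

theorem gpf_good (v : Int) (hv : 2 ≤ v) : Good (get_prime_factors v) v.toNat := by
  have h := pvOuterGood v.toNat (by omega) (v.natAbs + 2) 2 v PySem.Dict.empty
    ⟨by omega, by norm_num, by
        have : (PySem.Dict.empty : PySem.Dict Int Int).keys = [] := rfl
        simp [this],
      by
        intro pc hpc
        have : (PySem.Dict.empty : PySem.Dict Int Int).items = [] := rfl
        rw [this] at hpc
        simp at hpc,
      by intro q; rw [PySem.Dict.getD_empty]; ring,
      by
        intro q hq
        apply Nat.factorization_eq_zero_of_not_prime
        intro hp
        have := hp.two_le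
        omega⟩
    (by omega)
  simpa only [get_prime_factors] using h

theorem pvAFold : ∀ (vs : List Int) (D : PySem.Dict Int Int) (N : Nat), Good D N →
    Good (vs.foldl (fun mf v => (get_prime_factors v).items.foldl
          (fun mf pc => mf.insert pc.1 (max (mf.getD pc.1 0) pc.2)) mf) D)
      (vs.foldl (fun n v => if v < 2 then n else Nat.lcm n v.toNat) N) := by
  intro vs
  induction vs with
  | nil => intro D N h; simpa using h
  | cons v vs ih =>
    intro D N h
    simp only [List.foldl_cons]
    by_cases hv : v < 2
    · rw [if_pos hv, gpf_small v hv]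
      have hits : (PySem.Dict.empty : PySem.Dict Int Int).items = [] := rfl
      rw [hits]
      simpa using ih D N h
    · rw [if_neg hv]
      exact ih _ _ (pvMerge h (gpf_good v (by omega)))

-- ===== VERDICT (by name: the statement is the Claim_ definition above) =====
theorem solve_query_spec : Claim_equal_solve_query := by
  intro a l r MOD _ _
  show solve_query a l r MOD = solve_query_alt a l r MOD
  have hGood := pvAFold ((PySem.List.pyRange l (r + 1) 1).map (fun i => PySem.List.pyGetD a i 0))
    PySem.Dict.empty 1 pvGood_empty
  have hBeq := pvBfold_eq ((PySem.List.pyRange l (r + 1) 1).map (fun i => PySem.List.pyGetD a i 0)) 1 one_pos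
  simp only [Nat.cast_one] at hBeq
  have hNpos := pvNfold_pos ((PySem.List.pyRange l (r + 1) 1).map (fun i => PySem.List.pyGetD a i 0)) 1 one_pos
  simp only [List.foldl_map] at hGood hBeq hNpos
  have hA : solve_query a l r MOD
      = ((PySem.List.pyRange l (r + 1) 1).foldl
          (fun mf i => (get_prime_factors (PySem.List.pyGetD a i 0)).items.foldl
            (fun mf pc => mf.insert pc.1 (max (mf.getD pc.1 0) pc.2)) mf)
          PySem.Dict.empty).items.foldl
          (fun res pc =>
            (PySem.List.pyRange 0 pc.2 1).foldl (fun res _ => PySem.Int.mod (res * pc.1) MOD) res)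
          1 := rfl
  have hB : solve_query_alt a l r MOD
      = (if ((PySem.List.pyRange l (r + 1) 1).foldl
            (fun L i => if PySem.List.pyGetD a i 0 < 2 then L
              else PySem.Int.floordiv (L * PySem.List.pyGetD a i 0)
                (pyGcdLoop ((PySem.List.pyGetD a i 0).natAbs + 1) L (PySem.List.pyGetD a i 0))) 1) > 1
        then PySem.Int.mod
          ((PySem.List.pyRange l (r + 1) 1).foldl
            (fun L i => if PySem.List.pyGetD a i 0 < 2 then L
              else PySem.Int.floordiv (L * PySem.List.pyGetD a i 0)
                (pyGcdLoop ((PySem.List.pyGetD a i 0).natAbs + 1) L (PySem.List.pyGetD a i 0))) 1) MOD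
        else 1) := rfl
  rw [hA, hB, hBeq]
  rw [pvOuterLoop MOD _ 1 (fun pc hpc => (hGood.2.2.1 pc hpc).2)]
  rw [pvGood_prod hGood, one_mul]
  by_cases h1 : ((PySem.List.pyRange l (r + 1) 1).foldl
      (fun n i => if PySem.List.pyGetD a i 0 < 2 then n else Nat.lcm n (PySem.List.pyGetD a i 0).toNat) 1) = 1
  · rw [if_pos ((pvGood_empty_iff hGood).mpr h1), h1]
    norm_num
  · rw [if_neg (fun he => h1 ((pvGood_empty_iff hGood).mp he)),
      if_pos (by omega)]
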